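-- pv_equiv track=rewrite | github.com/Pibben/aoc_2021 | 24/24.py | do_block
-- ===== SOURCE A (Python) =====
-- def do_block(block, w, z):
--     regs = {'x': 0, 'y': 0, 'z': z, 'w': w}
--     for line in block:
--         instr = line.split(' ')
--
--         if instr[0] == 'add':
--             if instr[2][0] == '-' or instr[2].isnumeric():
--                 num = int(instr[2])
--                 regs[instr[1]] += num
--             else:
--                 regs[instr[1]] += regs[instr[2]]
--         elif instr[0] == 'mul':
--             if instr[2][0] == '-' or instr[2].isnumeric():
--                 num = int(instr[2])
--                 regs[instr[1]] *= num
--             else: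
--                 regs[instr[1]] *= regs[instr[2]]
--         elif instr[0] == 'mod':
--             if instr[2][0] == '-' or instr[2].isnumeric():
--                 num = int(instr[2])
--                 if num <= 0 or regs[instr[1]] < 0:
--                     return None
--                 regs[instr[1]] %= num
--             else:
--                 if regs[instr[2]] <= 0 or regs[instr[1]] < 0:
--                     return None
--                 regs[instr[1]] %= regs[instr[2]]
--         elif instr[0] == 'div':
--             if instr[2][0] == '-' or instr[2].isnumeric():
--                 num = int(instr[2])
--                 if num == 0:
--                     return None
--                 regs[instr[1]] //= num
--             else:
--                 if regs[instr[2]] == 0: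
--                     return None
--                 regs[instr[1]] //= regs[instr[2]]
--         elif instr[0] == 'eql':
--             if instr[2][0] == '-' or instr[2].isnumeric():
--                 num = int(instr[2])
--                 regs[instr[1]] = int(regs[instr[1]] == num)
--             else:
--                 regs[instr[1]] = int(regs[instr[1]] == regs[instr[2]])
--         else:
--             assert False
--
--     return regs['z']
-- ===== SOURCE B (Python) =====
-- def do_block(block, w, z):
--     # Stage 1: compile the textual block into an IR over register *indices*
--     # (x,y,z,w -> 0,1,2,3), with each operand decoded once: (op, d, r, imm)
--     # where r is a register index or None for an immediate imm.
--     idx = {'x': 0, 'y': 1, 'z': 2, 'w': 3}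
--     prog = []
--     for line in block:
--         parts = line.split(' ')
--         op, dst, src = parts[0], parts[1], parts[2]
--         assert op in ('add', 'mul', 'mod', 'div', 'eql')
--         if src[0] == '-' or src.isnumeric():
--             prog.append((op, idx[dst], None, int(src)))
--         else:
--             prog.append((op, idx[dst], idx[src], 0))
--
--     # Stage 2: recursively execute the compiled program on a register list.
--     def step(instr, regs):
--         op, d, r, imm = instr
--         v = imm if r is None else regs[r]
--         cur = regs[d]
--         if op == 'add':
--             new = cur + v
--         elif op == 'mul':
--             new = cur * v
--         elif op == 'eql':
--             new = int(cur == v)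
--         elif op == 'mod':
--             if v <= 0 or cur < 0:
--                 return None
--             new = cur % v
--         else:  # 'div'
--             if v == 0:
--                 return None
--             new = cur // v
--         return regs[:d] + [new] + regs[d + 1:]
--
--     def run(pc, regs):
--         if pc == len(prog):
--             return regs[2]
--         regs2 = step(prog[pc], regs)
--         if regs2 is None:
--             return None
--         return run(pc + 1, regs2)
--
--     return run(0, [0, 0, z, w])
-- ===== Notes on version B (the rewrite author's own statement) =====
-- stated objective: alternative
-- what changed: B is a two-stage compile-then-execute interpreter: a first pass compiles each text line into an IR tuple over numeric register indices with the operand decoded once (immediate vs register index), and a second recursive executor runs the compiled program over a 4-element register list instead of A's single pass over strings mutating a name-keyed dict.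
-- outside the precondition, e.g. on do_block(['mod x 0', 'bogus'], 0, 0): A returns None, B raises IndexError
import Mathlib
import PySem

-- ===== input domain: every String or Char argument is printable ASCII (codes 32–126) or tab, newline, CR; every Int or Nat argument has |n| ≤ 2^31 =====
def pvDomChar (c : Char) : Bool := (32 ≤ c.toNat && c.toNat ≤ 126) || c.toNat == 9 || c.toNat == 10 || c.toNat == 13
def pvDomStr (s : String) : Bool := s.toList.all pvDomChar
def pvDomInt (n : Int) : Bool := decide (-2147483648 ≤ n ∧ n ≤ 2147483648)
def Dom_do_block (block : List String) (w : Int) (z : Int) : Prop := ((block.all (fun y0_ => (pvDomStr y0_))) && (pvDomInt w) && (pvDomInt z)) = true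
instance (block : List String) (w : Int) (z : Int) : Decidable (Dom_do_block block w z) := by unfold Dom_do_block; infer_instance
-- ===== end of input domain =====

-- B is a two-stage compile-then-execute interpreter (IR over register indices, 4-element
-- register list, recursive executor) where A interprets the strings directly over a dict;
-- equal return value on Pre_ (no speed claim). In both ports a Python exception
-- (IndexError/KeyError/ValueError/AssertionError) is rendered as `none`; Pre_ excludes all
-- exception cases, where the two outcomes would be conflated.

-- ===== PORT A =====
-- s.split(' ') with the single-space separator; split? is `none` only for an empty separator
def pvSplitSp (line : String) : List String := (PySem.Str.split? line " ").getD []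

-- `instr[2][0] == '-' or instr[2].isnumeric()`; none = IndexError on the empty string.
-- `.isnumeric()` is ported as strIsdigit, exact on the ASCII domain.
def pyNumLike (s : String) : Option Bool :=
  match PySem.Str.pyGet? s 0 with
  | none => none
  | some c => some (c == '-' || PySem.Str.strIsdigit s)

-- one iteration of A's loop body; `none` = exception raised or `return None` taken
def stepA (regs : PySem.Dict String Int) (line : String) : Option (PySem.Dict String Int) :=
  match pvSplitSp line with
  | op :: a :: b :: _ =>
    if op == "add" then
      match pyNumLike b with
      | none => none
      | some true =>
        match PySem.Int.ofStr? b, regs.get? a with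
        | some num, some va => some (regs.insert a (va + num))
        | _, _ => none
      | some false =>
        match regs.get? a, regs.get? b with
        | some va, some vb => some (regs.insert a (va + vb))
        | _, _ => none
    else if op == "mul" then
      match pyNumLike b with
      | none => none
      | some true =>
        match PySem.Int.ofStr? b, regs.get? a with
        | some num, some va => some (regs.insert a (va * num))
        | _, _ => none
      | some false =>
        match regs.get? a, regs.get? b with
        | some va, some vb => some (regs.insert a (va * vb))
        | _, _ => none
    else if op == "mod" then
      match pyNumLike b with
      | none => none
      | some true =>
        match PySem.Int.ofStr? b with
        | none => none
        | some num =>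
          if num ≤ 0 then none
          else match regs.get? a with
            | none => none
            | some va => if va < 0 then none else some (regs.insert a (PySem.Int.mod va num))
      | some false =>
        match regs.get? b with
        | none => none
        | some vb =>
          if vb ≤ 0 then none
          else match regs.get? a with
            | none => none
            | some va => if va < 0 then none else some (regs.insert a (PySem.Int.mod va vb))
    else if op == "div" then
      match pyNumLike b with
      | none => none
      | some true =>
        match PySem.Int.ofStr? b with
        | none => none
        | some num =>
          if num == 0 then none
          else match regs.get? a with
            | none => none
            | some va => some (regs.insert a (PySem.Int.floordiv va num))
      | some false =>
        match regs.get? b with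
        | none => none
        | some vb =>
          if vb == 0 then none
          else match regs.get? a with
            | none => none
            | some va => some (regs.insert a (PySem.Int.floordiv va vb))
    else if op == "eql" then
      match pyNumLike b with
      | none => none
      | some true =>
        match PySem.Int.ofStr? b, regs.get? a with
        | some num, some va => some (regs.insert a (if va == num then (1:Int) else 0))
        | _, _ => none
      | some false =>
        match regs.get? a, regs.get? b with
        | some va, some vb => some (regs.insert a (if va == vb then (1:Int) else 0))
        | _, _ => none
    else none  -- assert False
  | _ => none  -- IndexError on instr[1] / instr[2]

def runA : List String → PySem.Dict String Int → Option Int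
  | [], regs => regs.get? "z"
  | l :: rest, regs =>
    match stepA regs l with
    | none => none
    | some r => runA rest r

def do_block (block : List String) (w : Int) (z : Int) : Option Int :=
  runA block (((((PySem.Dict.empty).insert "x" 0).insert "y" 0).insert "z" z).insert "w" w)

-- ===== PORT B =====
-- the `idx` dict of Source B: register name -> index; none = KeyError
def idxReg (s : String) : Option Nat :=
  if s == "x" then some 0 else if s == "y" then some 1
  else if s == "z" then some 2 else if s == "w" then some 3 else none

-- stage 1: compile one line to (op, d, r, imm); none = any exception in the compile loop
def compileLine (line : String) : Option (String × Nat × Option Nat × Int) :=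
  match pvSplitSp line with
  | op :: dst :: src :: _ =>
    if op == "add" || op == "mul" || op == "mod" || op == "div" || op == "eql" then
      match idxReg dst with
      | none => none
      | some d =>
        match PySem.Str.pyGet? src 0 with
        | none => none
        | some c =>
          if c == '-' || PySem.Str.strIsdigit src then
            match PySem.Int.ofStr? src with
            | none => none
            | some n => some (op, d, none, n)
          else
            match idxReg src with
            | none => none
            | some r => some (op, d, some r, 0)
    else none  -- assert fails
  | _ => none  -- IndexError on parts[1] / parts[2]

def compileAll : List String → Option (List (String × Nat × Option Nat × Int))
  | [] => some []
  | l :: rest =>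
    match compileLine l with
    | none => none
    | some i =>
      match compileAll rest with
      | none => none
      | some p => some (i :: p)

-- Source B's `step`: regs[:d] + [new] + regs[d+1:] is take/drop (exact: d ≥ 0 nonneg slice)
def stepIR (instr : String × Nat × Option Nat × Int) (regs : List Int) : Option (List Int) :=
  match instr with
  | (op, d, r, imm) =>
    match (match r with | none => some imm | some ri => PySem.List.pyGet? regs (ri : Int)) with
    | none => none
    | some v =>
      match PySem.List.pyGet? regs (d : Int) with
      | none => none
      | some cur =>
        if op == "add" then some (regs.take d ++ [cur + v] ++ regs.drop (d + 1))
        else if op == "mul" then some (regs.take d ++ [cur * v] ++ regs.drop (d + 1))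
        else if op == "eql" then
          some (regs.take d ++ [(if cur == v then (1:Int) else 0)] ++ regs.drop (d + 1))
        else if op == "mod" then
          if v ≤ 0 || cur < 0 then none
          else some (regs.take d ++ [PySem.Int.mod cur v] ++ regs.drop (d + 1))
        else  -- 'div' (the compile stage admits no other opcode)
          if v == 0 then none
          else some (regs.take d ++ [PySem.Int.floordiv cur v] ++ regs.drop (d + 1))

-- stage 2: Source B's `run` recursion (pc over prog = structural recursion on the suffix)
def runIR : List (String × Nat × Option Nat × Int) → List Int → Option Int
  | [], regs => PySem.List.pyGet? regs 2
  | i :: rest, regs =>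
    match stepIR i regs with
    | none => none
    | some r2 => runIR rest r2

def do_block_alt (block : List String) (w : Int) (z : Int) : Option Int :=
  match compileAll block with
  | none => none
  | some prog => runIR prog [0, 0, z, w]

-- ===== PRECONDITION & SPEC =====
-- Pre_ excludes every block containing an ill-formed line (unknown opcode, unknown register,
-- unparsable operand, fewer than 3 tokens): on such blocks A either raises
-- (IndexError/KeyError/ValueError/AssertionError) or -- when an earlier mod/div guard fires
-- first -- returns None while B's compile stage raises on the ill-formed later line.
def validLine (line : String) : Bool :=
  match pvSplitSp line with
  | op :: dst :: src :: _ =>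
    (op == "add" || op == "mul" || op == "mod" || op == "div" || op == "eql") &&
    (dst == "x" || dst == "y" || dst == "z" || dst == "w") &&
    (match PySem.Str.pyGet? src 0 with
     | none => false
     | some c =>
       if c == '-' || PySem.Str.strIsdigit src then (PySem.Int.ofStr? src).isSome
       else src == "x" || src == "y" || src == "z" || src == "w")
  | _ => false

def Pre_do_block (block : List String) (w : Int) (z : Int) : Prop :=
  ∀ line ∈ block, validLine line = true

instance (block : List String) (w : Int) (z : Int) : Decidable (Pre_do_block block w z) := by
  unfold Pre_do_block; infer_instance

def pvWitness_do_block : List String × Int × Int :=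
  (["add x 5", "mul x w", "add z x", "eql x -3", "div z 2", "mod z 100"], 3, 9)

def Spec_do_block (block : List String) (w : Int) (z : Int) (out : Option Int) : Prop := out = do_block_alt block w z
instance (block : List String) (w : Int) (z : Int) (out : Option Int) : Decidable (Spec_do_block block w z out) := by unfold Spec_do_block; infer_instance

-- ===== CLAIM (what is proved, stated in full; the proofs are below) =====
def Claim_equal_do_block : Prop := ∀ (block : List String) (w : Int) (z : Int), Dom_do_block block w z → Pre_do_block block w z → Spec_do_block block w z (do_block block w z)

-- ===== LEMMAS AND PROOFS =====
-- the canonical register dict A's loop maintains (insert overwrites in place, so it is stable)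
def mkRegs (a b c d : Int) : PySem.Dict String Int :=
  (((((PySem.Dict.empty).insert "x" a).insert "y" b).insert "z" c).insert "w" d)


theorem idx_get (dst : String) (di : Nat) (h : idxReg dst = some di) (a b c d : Int) :
    (mkRegs a b c d).get? dst = PySem.List.pyGet? [a, b, c, d] (di : Int) := by
  unfold idxReg at h
  split_ifs at h with h1 h2 h3 h4
  · obtain rfl : dst = "x" := by simpa using h1
    injection h with h
    subst h
    rfl
  · obtain rfl : dst = "y" := by simpa using h2
    injection h with h
    subst h
    rfl
  · obtain rfl : dst = "z" := by simpa using h3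
    injection h with h
    subst h
    rfl
  · obtain rfl : dst = "w" := by simpa using h4
    injection h with h
    subst h
    rfl
theorem idx_upd (dst : String) (di : Nat) (h : idxReg dst = some di) (a b c d v : Int) :
    ∃ a2 b2 c2 d2, (mkRegs a b c d).insert dst v = mkRegs a2 b2 c2 d2 ∧
      List.take di [a, b, c, d] ++ [v] ++ List.drop (di + 1) [a, b, c, d] = [a2, b2, c2, d2] := by
  unfold idxReg at h
  split_ifs at h with h1 h2 h3 h4
  · obtain rfl : dst = "x" := by simpa using h1
    injection h with h
    subst h
    exact ⟨_, _, _, _, rfl, rfl⟩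
  · obtain rfl : dst = "y" := by simpa using h2
    injection h with h
    subst h
    exact ⟨_, _, _, _, rfl, rfl⟩
  · obtain rfl : dst = "z" := by simpa using h3
    injection h with h
    subst h
    exact ⟨_, _, _, _, rfl, rfl⟩
  · obtain rfl : dst = "w" := by simpa using h4
    injection h with h
    subst h
    exact ⟨_, _, _, _, rfl, rfl⟩

set_option maxHeartbeats 1600000 in
theorem step_sim (line : String) (hv : validLine line = true) (x0 x1 x2 x3 : Int) :
    ∃ instr, compileLine line = some instr ∧
      ((stepA (mkRegs x0 x1 x2 x3) line = none ∧ stepIR instr [x0, x1, x2, x3] = none) ∨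
       ∃ a2 b2 c2 d2, stepA (mkRegs x0 x1 x2 x3) line = some (mkRegs a2 b2 c2 d2) ∧
         stepIR instr [x0, x1, x2, x3] = some [a2, b2, c2, d2]) := by
  unfold validLine at hv
  cases hs : pvSplitSp line with
  | nil => rw [hs] at hv; simp at hv
  | cons op t =>
  cases t with
  | nil => rw [hs] at hv; simp at hv
  | cons dst t2 =>
  cases t2 with
  | nil => rw [hs] at hv; simp at hv
  | cons src rest =>
  rw [hs] at hv
  simp only [Bool.and_eq_true, Bool.or_eq_true, beq_iff_eq] at hv
  obtain ⟨⟨hop, hdst⟩, hsrc⟩ := hv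
  have hdi : ∃ di, idxReg dst = some di := by
    rcases hdst with ((rfl | rfl) | rfl) | rfl
    exacts [⟨0, rfl⟩, ⟨1, rfl⟩, ⟨2, rfl⟩, ⟨3, rfl⟩]
  obtain ⟨di, hdi⟩ := hdi
  revert hsrc
  cases hg : PySem.Str.pyGet? src 0 with
  | none => intro hsrc; simp at hsrc
  | some c =>
  intro hsrc
  have hgL : PySem.List.pyGet? src.toList 0 = some c := by simpa using hg
  by_cases hb : c = '-' ∨ PySem.Chars.strIsdigit src.toList = true
  · have hbP : c = '-' ∨ PySem.Chars.strIsdigit src.toList = true := hb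
    have hbTL : (c == '-' || PySem.Chars.strIsdigit src.toList) = true := by
      rcases hb with h | h <;> simp [h]
    have hsome : ∃ n, PySem.Int.ofStr? src = some n := by
      simpa [hb, Option.isSome_iff_exists] using hsrc
    obtain ⟨n, hn⟩ := hsome
    rcases hop with (((rfl | rfl) | rfl) | rfl) | rfl
    · -- add, immediate operand
      refine ⟨("add", di, none, n), by simp [compileLine, hs, hgL, hbP, hn, hdi], ?_⟩
      cases hcur : [x0, x1, x2, x3][di]? with
      | none => exact Or.inl ⟨by simp [stepA, pyNumLike, hs, hgL, hbTL, hn, idx_get dst di hdi, hcur], by simp [stepIR, hcur]⟩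
      | some cur =>
        obtain ⟨a2, b2, c2, d2, hi, hl⟩ := idx_upd dst di hdi x0 x1 x2 x3 (cur + n)
        refine Or.inr ⟨a2, b2, c2, d2, by simp [stepA, pyNumLike, hs, hgL, hbTL, hn, idx_get dst di hdi, hcur, hi], ?_⟩
        simp_all [stepIR]
    · -- mul, immediate operand
      refine ⟨("mul", di, none, n), by simp [compileLine, hs, hgL, hbP, hn, hdi], ?_⟩
      cases hcur : [x0, x1, x2, x3][di]? with
      | none => exact Or.inl ⟨by simp [stepA, pyNumLike, hs, hgL, hbTL, hn, idx_get dst di hdi, hcur], by simp [stepIR, hcur]⟩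
      | some cur =>
        obtain ⟨a2, b2, c2, d2, hi, hl⟩ := idx_upd dst di hdi x0 x1 x2 x3 (cur * n)
        refine Or.inr ⟨a2, b2, c2, d2, by simp [stepA, pyNumLike, hs, hgL, hbTL, hn, idx_get dst di hdi, hcur, hi], ?_⟩
        simp_all [stepIR]
    · -- mod, immediate operand
      refine ⟨("mod", di, none, n), by simp [compileLine, hs, hgL, hbP, hn, hdi], ?_⟩
      by_cases hg1 : n ≤ 0
      · refine Or.inl ⟨by simp [stepA, pyNumLike, hs, hgL, hbTL, hn, idx_get dst di hdi, hg1], ?_⟩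
        cases hcur : [x0, x1, x2, x3][di]? <;> simp [stepIR, hcur, hg1]
      · cases hcur : [x0, x1, x2, x3][di]? with
        | none => exact Or.inl ⟨by simp [stepA, pyNumLike, hs, hgL, hbTL, hn, idx_get dst di hdi, hg1, hcur], by simp [stepIR, hcur]⟩
        | some cur =>
          by_cases hg2 : cur < 0
          · exact Or.inl ⟨by simp [stepA, pyNumLike, hs, hgL, hbTL, hn, idx_get dst di hdi, hg1, hcur, hg2], by simp [stepIR, hcur, hg1, hg2]⟩
          · obtain ⟨a2, b2, c2, d2, hi, hl⟩ := idx_upd dst di hdi x0 x1 x2 x3 (PySem.Int.mod cur n)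
            refine Or.inr ⟨a2, b2, c2, d2, by simp [stepA, pyNumLike, hs, hgL, hbTL, hn, idx_get dst di hdi, hg1, hcur, hg2, hi], ?_⟩
            simp_all [stepIR]
    · -- div, immediate operand
      refine ⟨("div", di, none, n), by simp [compileLine, hs, hgL, hbP, hn, hdi], ?_⟩
      by_cases hg1 : n = 0
      · refine Or.inl ⟨by simp [stepA, pyNumLike, hs, hgL, hbTL, hn, idx_get dst di hdi, hg1], ?_⟩
        cases hcur : [x0, x1, x2, x3][di]? <;> simp [stepIR, hcur, hg1]
      · cases hcur : [x0, x1, x2, x3][di]? with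
        | none => exact Or.inl ⟨by simp [stepA, pyNumLike, hs, hgL, hbTL, hn, idx_get dst di hdi, hg1, hcur], by simp [stepIR, hcur]⟩
        | some cur =>
          obtain ⟨a2, b2, c2, d2, hi, hl⟩ := idx_upd dst di hdi x0 x1 x2 x3 (PySem.Int.floordiv cur n)
          refine Or.inr ⟨a2, b2, c2, d2, by simp [stepA, pyNumLike, hs, hgL, hbTL, hn, idx_get dst di hdi, hg1, hcur, hi], ?_⟩
          simp_all [stepIR]
    · -- eql, immediate operand
      refine ⟨("eql", di, none, n), by simp [compileLine, hs, hgL, hbP, hn, hdi], ?_⟩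
      cases hcur : [x0, x1, x2, x3][di]? with
      | none => exact Or.inl ⟨by simp [stepA, pyNumLike, hs, hgL, hbTL, hn, idx_get dst di hdi, hcur], by simp [stepIR, hcur]⟩
      | some cur =>
        obtain ⟨a2, b2, c2, d2, hi, hl⟩ := idx_upd dst di hdi x0 x1 x2 x3 (if cur = n then (1:Int) else 0)
        refine Or.inr ⟨a2, b2, c2, d2, by simp [stepA, pyNumLike, hs, hgL, hbTL, hn, idx_get dst di hdi, hcur, hi], ?_⟩
        simp_all [stepIR]
  · have hbPn : ¬(c = '-' ∨ PySem.Chars.strIsdigit src.toList = true) := hb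
    have hbFL : (c == '-' || PySem.Chars.strIsdigit src.toList) = false := by
      rw [Bool.or_eq_false_iff, beq_eq_false_iff_ne]
      refine ⟨fun h => hb (Or.inl h), ?_⟩
      cases hsd : PySem.Chars.strIsdigit src.toList
      · rfl
      · exact absurd (Or.inr hsd) hb
    have hsrc4 : ((src = "x" ∨ src = "y") ∨ src = "z") ∨ src = "w" := by
      simpa [hb] using hsrc
    have hri : ∃ ri, idxReg src = some ri := by
      rcases hsrc4 with ((rfl | rfl) | rfl) | rfl
      exacts [⟨0, rfl⟩, ⟨1, rfl⟩, ⟨2, rfl⟩, ⟨3, rfl⟩]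
    obtain ⟨ri, hri⟩ := hri
    rcases hop with (((rfl | rfl) | rfl) | rfl) | rfl
    · -- add, register operand
      refine ⟨("add", di, some ri, 0), by simp [compileLine, hs, hgL, hbPn, hdi, hri], ?_⟩
      cases hval : [x0, x1, x2, x3][ri]? with
      | none =>
        refine Or.inl ⟨?_, by simp [stepIR, hval]⟩
        cases hcur : [x0, x1, x2, x3][di]? <;> simp [stepA, pyNumLike, hs, hgL, hbFL, idx_get dst di hdi, idx_get src ri hri, hval, hcur]
      | some v =>
        cases hcur : [x0, x1, x2, x3][di]? with
        | none => exact Or.inl ⟨by simp [stepA, pyNumLike, hs, hgL, hbFL, idx_get dst di hdi, idx_get src ri hri, hval, hcur], by simp [stepIR, hval, hcur]⟩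
        | some cur =>
          obtain ⟨a2, b2, c2, d2, hi, hl⟩ := idx_upd dst di hdi x0 x1 x2 x3 (cur + v)
          refine Or.inr ⟨a2, b2, c2, d2, by simp [stepA, pyNumLike, hs, hgL, hbFL, idx_get dst di hdi, idx_get src ri hri, hval, hcur, hi], ?_⟩
          simp_all [stepIR]
    · -- mul, register operand
      refine ⟨("mul", di, some ri, 0), by simp [compileLine, hs, hgL, hbPn, hdi, hri], ?_⟩
      cases hval : [x0, x1, x2, x3][ri]? with
      | none =>
        refine Or.inl ⟨?_, by simp [stepIR, hval]⟩
        cases hcur : [x0, x1, x2, x3][di]? <;> simp [stepA, pyNumLike, hs, hgL, hbFL, idx_get dst di hdi, idx_get src ri hri, hval, hcur]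
      | some v =>
        cases hcur : [x0, x1, x2, x3][di]? with
        | none => exact Or.inl ⟨by simp [stepA, pyNumLike, hs, hgL, hbFL, idx_get dst di hdi, idx_get src ri hri, hval, hcur], by simp [stepIR, hval, hcur]⟩
        | some cur =>
          obtain ⟨a2, b2, c2, d2, hi, hl⟩ := idx_upd dst di hdi x0 x1 x2 x3 (cur * v)
          refine Or.inr ⟨a2, b2, c2, d2, by simp [stepA, pyNumLike, hs, hgL, hbFL, idx_get dst di hdi, idx_get src ri hri, hval, hcur, hi], ?_⟩
          simp_all [stepIR]
    · -- mod, register operand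
      refine ⟨("mod", di, some ri, 0), by simp [compileLine, hs, hgL, hbPn, hdi, hri], ?_⟩
      cases hval : [x0, x1, x2, x3][ri]? with
      | none =>
        refine Or.inl ⟨?_, by simp [stepIR, hval]⟩
        cases hcur : [x0, x1, x2, x3][di]? <;> simp [stepA, pyNumLike, hs, hgL, hbFL, idx_get dst di hdi, idx_get src ri hri, hval, hcur]
      | some v =>
        by_cases hg1 : v ≤ 0
        · refine Or.inl ⟨by simp [stepA, pyNumLike, hs, hgL, hbFL, idx_get dst di hdi, idx_get src ri hri, hval, hg1], ?_⟩
          cases hcur : [x0, x1, x2, x3][di]? <;> simp [stepIR, hval, hcur, hg1]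
        · cases hcur : [x0, x1, x2, x3][di]? with
          | none => exact Or.inl ⟨by simp [stepA, pyNumLike, hs, hgL, hbFL, idx_get dst di hdi, idx_get src ri hri, hval, hg1, hcur], by simp [stepIR, hval, hcur]⟩
          | some cur =>
            by_cases hg2 : cur < 0
            · exact Or.inl ⟨by simp [stepA, pyNumLike, hs, hgL, hbFL, idx_get dst di hdi, idx_get src ri hri, hval, hg1, hcur, hg2], by simp [stepIR, hval, hcur, hg1, hg2]⟩
            · obtain ⟨a2, b2, c2, d2, hi, hl⟩ := idx_upd dst di hdi x0 x1 x2 x3 (PySem.Int.mod cur v)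
              refine Or.inr ⟨a2, b2, c2, d2, by simp [stepA, pyNumLike, hs, hgL, hbFL, idx_get dst di hdi, idx_get src ri hri, hval, hg1, hcur, hg2, hi], ?_⟩
              simp_all [stepIR]
    · -- div, register operand
      refine ⟨("div", di, some ri, 0), by simp [compileLine, hs, hgL, hbPn, hdi, hri], ?_⟩
      cases hval : [x0, x1, x2, x3][ri]? with
      | none =>
        refine Or.inl ⟨?_, by simp [stepIR, hval]⟩
        cases hcur : [x0, x1, x2, x3][di]? <;> simp [stepA, pyNumLike, hs, hgL, hbFL, idx_get dst di hdi, idx_get src ri hri, hval, hcur]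
      | some v =>
        by_cases hg1 : v = 0
        · refine Or.inl ⟨by simp [stepA, pyNumLike, hs, hgL, hbFL, idx_get dst di hdi, idx_get src ri hri, hval, hg1], ?_⟩
          cases hcur : [x0, x1, x2, x3][di]? <;> simp [stepIR, hval, hcur, hg1]
        · cases hcur : [x0, x1, x2, x3][di]? with
          | none => exact Or.inl ⟨by simp [stepA, pyNumLike, hs, hgL, hbFL, idx_get dst di hdi, idx_get src ri hri, hval, hg1, hcur], by simp [stepIR, hval, hcur]⟩
          | some cur =>
            obtain ⟨a2, b2, c2, d2, hi, hl⟩ := idx_upd dst di hdi x0 x1 x2 x3 (PySem.Int.floordiv cur v)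
            refine Or.inr ⟨a2, b2, c2, d2, by simp [stepA, pyNumLike, hs, hgL, hbFL, idx_get dst di hdi, idx_get src ri hri, hval, hg1, hcur, hi], ?_⟩
            simp_all [stepIR]
    · -- eql, register operand
      refine ⟨("eql", di, some ri, 0), by simp [compileLine, hs, hgL, hbPn, hdi, hri], ?_⟩
      cases hval : [x0, x1, x2, x3][ri]? with
      | none =>
        refine Or.inl ⟨?_, by simp [stepIR, hval]⟩
        cases hcur : [x0, x1, x2, x3][di]? <;> simp [stepA, pyNumLike, hs, hgL, hbFL, idx_get dst di hdi, idx_get src ri hri, hval, hcur]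
      | some v =>
        cases hcur : [x0, x1, x2, x3][di]? with
        | none => exact Or.inl ⟨by simp [stepA, pyNumLike, hs, hgL, hbFL, idx_get dst di hdi, idx_get src ri hri, hval, hcur], by simp [stepIR, hval, hcur]⟩
        | some cur =>
          obtain ⟨a2, b2, c2, d2, hi, hl⟩ := idx_upd dst di hdi x0 x1 x2 x3 (if cur = v then (1:Int) else 0)
          refine Or.inr ⟨a2, b2, c2, d2, by simp [stepA, pyNumLike, hs, hgL, hbFL, idx_get dst di hdi, idx_get src ri hri, hval, hcur, hi], ?_⟩
          simp_all [stepIR]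

theorem compileAll_some (block : List String) (hv : ∀ l ∈ block, validLine l = true) :
    ∃ p, compileAll block = some p := by
  induction block with
  | nil => exact ⟨[], rfl⟩
  | cons l rest ih =>
    obtain ⟨instr, hc, -⟩ := step_sim l (hv l (by simp)) 0 0 0 0
    obtain ⟨p, hp⟩ := ih (fun x hx => hv x (by simp [hx]))
    exact ⟨instr :: p, by simp [compileAll, hc, hp]⟩

theorem run_sim (block : List String) (hv : ∀ line ∈ block, validLine line = true)
    (x0 x1 x2 x3 : Int) :
    ∃ prog, compileAll block = some prog ∧
      runA block (mkRegs x0 x1 x2 x3) = runIR prog [x0, x1, x2, x3] := by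
  induction block generalizing x0 x1 x2 x3 with
  | nil => exact ⟨[], rfl, rfl⟩
  | cons l rest ih =>
    obtain ⟨instr, hc, hstep⟩ := step_sim l (hv l (by simp)) x0 x1 x2 x3
    rcases hstep with ⟨hA, hB⟩ | ⟨a2, b2, c2, d2, hA, hB⟩
    · obtain ⟨p, hp⟩ := compileAll_some rest (fun x hx => hv x (by simp [hx]))
      exact ⟨instr :: p, by simp [compileAll, hc, hp], by simp [runA, runIR, hA, hB]⟩
    · obtain ⟨prog, hcr, hrun⟩ := ih (fun x hx => hv x (by simp [hx])) a2 b2 c2 d2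
      exact ⟨instr :: prog, by simp [compileAll, hc, hcr], by simp [runA, runIR, hA, hB, hrun]⟩

-- ===== VERDICT (by name: the statement is the Claim_ definition above) =====
theorem do_block_spec : Claim_equal_do_block := by
  intro block w z _ hpre
  unfold Spec_do_block do_block do_block_alt
  obtain ⟨prog, hc, hrun⟩ := run_sim block hpre 0 0 z w
  rw [hc]
  exact hrun
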